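-- pv_equiv track=rewrite | github.com/cec339/reaper-ai | bridge/auto_eq.py | _merge_cuts_to_reaeq
-- ===== SOURCE A (Python) =====
-- BAND_EDGES = [20, 40, 80, 160, 320, 640, 1250, 2500, 5000, 10000, 20000]
--
-- def _reaeq_band_names(calibration: dict) -> list[str]:
--     """Resolved ReaEQ band names from calibration, else defaults."""
--     names = calibration.get("band_names", [])
--     if isinstance(names, list):
--         cleaned = [str(n) for n in names if str(n).strip()]
--         if len(cleaned) >= 5:
--             return cleaned
--     return DEFAULT_REAEQ_BAND_NAMES
--
-- def _band_to_reaeq_map(calibration: dict) -> dict[int, int]: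
--     """Map 10 analysis bands to resolved ReaEQ band indices."""
--     num_analysis_bands = len(BAND_EDGES) - 1
--     reaeq_band_count = len(_reaeq_band_names(calibration))
--     if reaeq_band_count >= num_analysis_bands:
--         # Expanded ReaEQ layout: one-to-one mapping (10 analysis -> 10 ReaEQ).
--         return {i: i for i in range(num_analysis_bands)}
--     # Fallback for older/default 5-band layouts.
--     return DEFAULT_BAND_TO_REAEQ
--
-- DEFAULT_REAEQ_BAND_NAMES = ["Low Shelf", "Band 2", "Band 3", "High Shelf 4", "High Pass 5"]
--
-- DEFAULT_BAND_TO_REAEQ = {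
--     0: 0, 1: 0,   # Sub + Bass → Low Shelf
--     2: 1, 3: 1,   # Low-Mid + Mid → Band 2
--     4: 2, 5: 2,   # Mid + Upper-Mid → Band 3
--     6: 3, 7: 3,   # Presence + Presence → High Shelf 4
--     # Keep Air/Brilliance on the top bell/shelf lane, not High Pass 5.
--     # HP movement can become destructive when type switching is unavailable.
--     8: 3, 9: 3,
-- }
--
-- def _merge_cuts_to_reaeq(cuts: list[dict], calibration: dict) -> dict[int, dict]:
--     """Map analysis cuts onto ReaEQ bands, keeping the deepest cut per band."""
--     reaeq_cuts: dict[int, dict] = {}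
--     band_map = _band_to_reaeq_map(calibration)
--     for cut in cuts:
--         reaeq_idx = band_map.get(cut["band_index"])
--         if reaeq_idx is None:
--             continue
--         if reaeq_idx not in reaeq_cuts or cut["cut_db"] < reaeq_cuts[reaeq_idx]["cut_db"]:
--             reaeq_cuts[reaeq_idx] = cut
--     return reaeq_cuts
-- ===== SOURCE B (Python) =====
-- # B: two-pass decomposition — first pass builds a grouping dict of cuts per ReaEQ band
-- # index, second pass reduces each group to its deepest cut (first minimum on ties).
--
-- BAND_EDGES = [20, 40, 80, 160, 320, 640, 1250, 2500, 5000, 10000, 20000]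
--
-- DEFAULT_REAEQ_BAND_NAMES = ["Low Shelf", "Band 2", "Band 3", "High Shelf 4", "High Pass 5"]
--
-- DEFAULT_BAND_TO_REAEQ = {
--     0: 0, 1: 0,
--     2: 1, 3: 1,
--     4: 2, 5: 2,
--     6: 3, 7: 3,
--     8: 3, 9: 3,
-- }
--
-- def _reaeq_band_names(calibration: dict) -> list[str]:
--     names = calibration.get("band_names", [])
--     if isinstance(names, list):
--         cleaned = [str(n) for n in names if str(n).strip()]
--         if len(cleaned) >= 5:
--             return cleaned
--     return DEFAULT_REAEQ_BAND_NAMES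
--
-- def _band_to_reaeq_map(calibration: dict) -> dict[int, int]:
--     num_analysis_bands = len(BAND_EDGES) - 1
--     reaeq_band_count = len(_reaeq_band_names(calibration))
--     if reaeq_band_count >= num_analysis_bands:
--         return {i: i for i in range(num_analysis_bands)}
--     return DEFAULT_BAND_TO_REAEQ
--
-- def _merge_cuts_to_reaeq(cuts: list, calibration: dict) -> dict:
--     band_map = _band_to_reaeq_map(calibration)
--     groups: dict[int, list] = {}
--     for cut in cuts:
--         reaeq_idx = band_map.get(cut["band_index"])
--         if reaeq_idx is not None:
--             groups.setdefault(reaeq_idx, []).append(cut)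
--     merged: dict[int, dict] = {}
--     for idx, group in groups.items():
--         best = group[0]
--         for contender in group[1:]:
--             if contender["cut_db"] < best["cut_db"]:
--                 best = contender
--         merged[idx] = best
--     return merged
-- ===== Notes on version B (the rewrite author's own statement) =====
-- stated objective: alternative
-- what changed: Replaces the fused running-min dict loop with a two-pass decomposition: one pass builds a grouping dict of the mapped cuts per ReaEQ band index, a second pass reduces each group to its first-deepest cut.
import Mathlib
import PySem

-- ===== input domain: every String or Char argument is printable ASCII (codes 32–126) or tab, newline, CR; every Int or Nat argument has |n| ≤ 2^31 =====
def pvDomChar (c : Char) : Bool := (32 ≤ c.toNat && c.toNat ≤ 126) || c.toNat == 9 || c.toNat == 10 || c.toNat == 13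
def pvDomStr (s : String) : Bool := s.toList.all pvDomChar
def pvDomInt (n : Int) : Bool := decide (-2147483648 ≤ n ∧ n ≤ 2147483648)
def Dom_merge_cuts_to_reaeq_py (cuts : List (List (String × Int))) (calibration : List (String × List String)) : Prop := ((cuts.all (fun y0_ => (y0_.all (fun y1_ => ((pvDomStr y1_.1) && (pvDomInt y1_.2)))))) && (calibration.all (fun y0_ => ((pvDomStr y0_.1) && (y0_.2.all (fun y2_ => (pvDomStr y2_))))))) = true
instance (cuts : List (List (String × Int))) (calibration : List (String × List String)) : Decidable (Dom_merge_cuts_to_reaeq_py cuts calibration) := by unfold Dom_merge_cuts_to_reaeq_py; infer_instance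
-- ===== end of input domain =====

-- B re-implements the merge as a two-pass group-then-min(key) decomposition instead of A's fused running-min dict loop (alternative decomposition, same cost).


-- ===== PORT A =====
-- Module constants shared by both Python versions.
def pyBAND_EDGES : List Int := [20, 40, 80, 160, 320, 640, 1250, 2500, 5000, 10000, 20000]

def pyDEFAULT_REAEQ_BAND_NAMES : List String := ["Low Shelf", "Band 2", "Band 3", "High Shelf 4", "High Pass 5"]

def pyDEFAULT_BAND_TO_REAEQ : PySem.Dict Int Int :=
  PySem.Dict.mk [(0, 0), (1, 0), (2, 1), (3, 1), (4, 2), (5, 2), (6, 3), (7, 3), (8, 3), (9, 3)]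

-- _reaeq_band_names: calibration["band_names"] is typed list[str], so isinstance(names, list) is always true
-- and str(n) = n; 'if str(n).strip()' is nonemptiness of the stripped string.
def reaeq_band_names_py (calibration : List (String × List String)) : List String :=
  let names := (PySem.Dict.mk calibration).getD "band_names" []
  let cleaned := names.filter (fun n => PySem.Str.len (PySem.Str.strip n) != 0)
  if cleaned.length ≥ 5 then cleaned else pyDEFAULT_REAEQ_BAND_NAMES

-- _band_to_reaeq_map; the dict comprehension {i: i for i in range(num)} has distinct keys, so Dict.mk of the pair list is exact.
def band_to_reaeq_map_py (calibration : List (String × List String)) : PySem.Dict Int Int :=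
  let num : Int := (pyBAND_EDGES.length : Int) - 1
  let cnt : Int := ((reaeq_band_names_py calibration).length : Int)
  if cnt ≥ num then PySem.Dict.mk ((PySem.List.pyRange 0 num 1).map (fun i => (i, i)))
  else pyDEFAULT_BAND_TO_REAEQ

-- cut["cut_db"]: total via default 0; Pre_ guarantees the key is present wherever either Python evaluates it.
def cut_db_key (cut : List (String × Int)) : Int := (PySem.Dict.mk cut).getD "cut_db" 0

-- A's loop body: band_map.get(cut["band_index"]); skip on None; keep the cut iff band unused or strictly deeper.
def mergeStepA (bm : PySem.Dict Int Int) (acc : PySem.Dict Int (List (String × Int))) (cut : List (String × Int)) : PySem.Dict Int (List (String × Int)) :=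
  match (PySem.Dict.mk cut).get? "band_index" with
  | none => acc            -- Python: KeyError; excluded by Pre_
  | some b =>
    match bm.get? b with
    | none => acc          -- continue
    | some idx =>
      if acc.contains idx = false then acc.insert idx cut
      else if cut_db_key cut < cut_db_key (acc.getD idx []) then acc.insert idx cut
      else acc

def merge_cuts_to_reaeq_py (cuts : List (List (String × Int))) (calibration : List (String × List String)) : List (Int × List (String × Int)) :=
  (cuts.foldl (mergeStepA (band_to_reaeq_map_py calibration)) (PySem.Dict.mk [])).items

-- ===== PORT B =====
-- B's grouping pass: groups.setdefault(idx, []).append(cut), i.e. groups[idx] = groups.get(idx, []) + [cut].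
def mergeStepB (bm : PySem.Dict Int Int) (groups : PySem.Dict Int (List (List (String × Int)))) (cut : List (String × Int)) : PySem.Dict Int (List (List (String × Int))) :=
  match (PySem.Dict.mk cut).get? "band_index" with
  | none => groups         -- Python: KeyError; excluded by Pre_
  | some b =>
    match bm.get? b with
    | none => groups
    | some idx => groups.modify idx [] (fun g => g ++ [cut])

-- B's per-group reduction: best = group[0], then scan group[1:] keeping the strictly deeper cut.
-- Groups are nonempty by construction, so the [] case (Python's group[0] IndexError) is unreachable.
def reduceGroup (grp : List (List (String × Int))) : List (String × Int) :=
  match grp with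
  | [] => []
  | best :: rest => rest.foldl (fun best c => if cut_db_key c < cut_db_key best then c else best) best

-- The second loop iterates groups.items() (distinct keys, insertion order), building merged in the same key order:
-- ported as a direct map over the items list.
def merge_cuts_to_reaeq_py_alt (cuts : List (List (String × Int))) (calibration : List (String × List String)) : List (Int × List (String × Int)) :=
  let groups := cuts.foldl (mergeStepB (band_to_reaeq_map_py calibration)) (PySem.Dict.mk [])
  groups.items.map (fun p => (p.1, reduceGroup p.2))

-- ===== PRECONDITION & SPEC =====
-- Pre_ excludes exactly the inputs on which the Python A raises KeyError — a cut without "band_index", or a cut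
-- mapped onto a contested ReaEQ band (two or more cuts land on the same index, so its "cut_db" gets compared)
-- without "cut_db"; the Python B raises on exactly the same inputs, so Pre_ is both programs' return domain.
def expandedLayout (calibration : List (String × List String)) : Bool :=
  decide (10 ≤ ((PySem.Dict.mk calibration).getD "band_names" []).countP
    (fun n => PySem.Str.len (PySem.Str.strip n) != 0))

def preMappedIdx (expanded : Bool) (cut : List (String × Int)) : Option Int :=
  match (PySem.Dict.mk cut).get? "band_index" with
  | none => none
  | some b =>
    if expanded then (if 0 ≤ b ∧ b ≤ 9 then some b else none)
    else (PySem.Dict.mk [((0 : Int), (0 : Int)), (1, 0), (2, 1), (3, 1), (4, 2), (5, 2), (6, 3), (7, 3), (8, 3), (9, 3)]).get? b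

def Pre_merge_cuts_to_reaeq_py (cuts : List (List (String × Int))) (calibration : List (String × List String)) : Prop :=
  cuts.all (fun cut =>
    match (PySem.Dict.mk cut).get? "band_index" with
    | none => false
    | some _ =>
      match preMappedIdx (expandedLayout calibration) cut with
      | none => true
      | some idx =>
        if 2 ≤ cuts.countP (fun c => preMappedIdx (expandedLayout calibration) c == some idx)
        then (PySem.Dict.mk cut).contains "cut_db" else true) = true
instance (cuts : List (List (String × Int))) (calibration : List (String × List String)) : Decidable (Pre_merge_cuts_to_reaeq_py cuts calibration) := by unfold Pre_merge_cuts_to_reaeq_py; infer_instance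

def pvWitness_merge_cuts_to_reaeq_py : (List (List (String × Int))) × (List (String × List String)) :=
  ([[("band_index", 0), ("cut_db", -3)], [("band_index", 5), ("cut_db", -1)]], [])

def Spec_merge_cuts_to_reaeq_py (cuts : List (List (String × Int))) (calibration : List (String × List String)) (out : List (Int × List (String × Int))) : Prop := out = merge_cuts_to_reaeq_py_alt cuts calibration
instance (cuts : List (List (String × Int))) (calibration : List (String × List String)) (out : List (Int × List (String × Int))) : Decidable (Spec_merge_cuts_to_reaeq_py cuts calibration out) := by unfold Spec_merge_cuts_to_reaeq_py; infer_instance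

-- ===== CLAIM (what is proved, stated in full; the proofs are below) =====
def Claim_equal_merge_cuts_to_reaeq_py : Prop := ∀ (cuts : List (List (String × Int))) (calibration : List (String × List String)), Dom_merge_cuts_to_reaeq_py cuts calibration → Pre_merge_cuts_to_reaeq_py cuts calibration → Spec_merge_cuts_to_reaeq_py cuts calibration (merge_cuts_to_reaeq_py cuts calibration)

-- ===== LEMMAS AND PROOFS =====
-- The reduction sending B's group dict to A's running-min dict: each group is collapsed to its first minimum.
def redEntry (p : Int × List (List (String × Int))) : Int × List (String × Int) :=
  (p.1, reduceGroup p.2)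

def redD (g : PySem.Dict Int (List (List (String × Int)))) : PySem.Dict Int (List (String × Int)) :=
  PySem.Dict.mk (g.items.map redEntry)

theorem contains_redD (g : PySem.Dict Int (List (List (String × Int)))) (idx : Int) :
    (redD g).contains idx = g.contains idx := by
  simp [redD, PySem.Dict.contains, List.any_map, redEntry, Function.comp_def]

theorem get?_redD (g : PySem.Dict Int (List (List (String × Int)))) (idx : Int) (grp : List (List (String × Int)))
    (hg : g.get? idx = some grp) :
    (redD g).get? idx = some (reduceGroup grp) := by
  simp only [redD, PySem.Dict.get?, List.find?_map] at *
  have hpred : ((fun p : Int × List (String × Int) => p.1 == idx) ∘ redEntry)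
      = (fun p : Int × List (List (String × Int)) => p.1 == idx) := by
    funext p; simp [redEntry]
  rw [hpred]
  cases hf : List.find? (fun p : Int × List (List (String × Int)) => p.1 == idx) g.items with
  | none => simp [hf] at hg
  | some q =>
    simp [hf] at hg
    simp [redEntry, hg]

theorem reduce_append (xs : List (List (String × Int))) (hx : xs ≠ []) (x : List (String × Int)) :
    reduceGroup (xs ++ [x]) =
      if cut_db_key x < cut_db_key (reduceGroup xs) then x else reduceGroup xs := by
  cases xs with
  | nil => exact absurd rfl hx
  | cons h t => simp [reduceGroup, List.cons_append, List.foldl_append]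

theorem step_red (bm : PySem.Dict Int Int) (g : PySem.Dict Int (List (List (String × Int)))) (cut : List (String × Int))
    (hnd : g.keys.Nodup) (hne : ∀ p ∈ g.items, p.2 ≠ []) :
    mergeStepA bm (redD g) cut = redD (mergeStepB bm g cut) := by
  unfold mergeStepA mergeStepB
  cases hb : (PySem.Dict.mk cut).get? "band_index" with
  | none => rfl
  | some b =>
    cases hi : bm.get? b with
    | none => simp [hi]
    | some idx =>
      simp only [hi]
      by_cases hc : g.contains idx = true
      · -- band already present
        have hrc : (redD g).contains idx = true := by rw [contains_redD]; exact hc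
        obtain ⟨grp, hg⟩ : ∃ grp, g.get? idx = some grp := by
          have := PySem.Dict.contains_eq_isSome_get? (d := g) (k := idx)
          rw [hc] at this
          cases hgo : g.get? idx with
          | none => rw [hgo] at this; simp at this
          | some grp => exact ⟨grp, rfl⟩
        have hmem : (idx, grp) ∈ g.items := PySem.Dict.mem_items_of_get?_eq_some _ hg
        have hgrpne : grp ≠ [] := hne _ hmem
        have hget : (redD g).getD idx [] = reduceGroup grp := by
          simp [PySem.Dict.getD, get?_redD g idx grp hg]
        have hgd : g.getD idx [] = grp := by simp [PySem.Dict.getD, hg]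
        have hmodify : g.modify idx [] (fun grp => grp ++ [cut]) = g.insert idx (grp ++ [cut]) := by
          simp [PySem.Dict.modify, hgd]
        rw [hmodify, hget, if_neg (by simp [hrc])]
        have hmin : reduceGroup (grp ++ [cut])
            = if cut_db_key cut < cut_db_key (reduceGroup grp) then cut else reduceGroup grp :=
          reduce_append grp hgrpne cut
        by_cases hlt : cut_db_key cut < cut_db_key (reduceGroup grp)
        · rw [if_pos hlt]
          apply PySem.Dict.ext
          rw [PySem.Dict.items_insert_of_contains _ _ hrc]
          show (g.items.map redEntry).map _ = ((g.insert idx (grp ++ [cut])).items).map redEntry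
          rw [PySem.Dict.items_insert_of_contains _ _ hc]
          rw [List.map_map, List.map_map]
          apply List.map_congr_left
          intro p _
          by_cases hp : p.1 = idx
          · simp [redEntry, hp, hmin, hlt]
          · simp [redEntry, hp]
        · rw [if_neg hlt]
          apply PySem.Dict.ext
          show g.items.map redEntry = ((g.insert idx (grp ++ [cut])).items).map redEntry
          rw [PySem.Dict.items_insert_of_contains _ _ hc]
          rw [List.map_map]
          apply List.map_congr_left
          intro p hp
          by_cases hpk : p.1 = idx
          · have : g.get? p.1 = some p.2 := by
              exact PySem.Dict.get?_of_mem_items g (by simpa using hp) hnd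
            rw [hpk, hg] at this
            have hval : p.2 = grp := by injection this with h; exact h.symm
            have hpe : p = (idx, grp) := by
              cases p; simp_all
            simp [hpe, redEntry, hmin, hlt]
          · simp [redEntry, hpk]
      · -- fresh band
        have hc' : g.contains idx = false := by simpa using hc
        have hrc : (redD g).contains idx = false := by rw [contains_redD]; exact hc'
        have hgd : g.getD idx [] = [] := PySem.Dict.getD_of_not_contains _ _ hc'
        have hmodify : g.modify idx [] (fun grp => grp ++ [cut]) = g.insert idx [cut] := by
          simp [PySem.Dict.modify, hgd]
        rw [hmodify, if_pos hrc]
        apply PySem.Dict.ext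
        show ((redD g).insert idx cut).items = ((g.insert idx [cut]).items).map redEntry
        rw [PySem.Dict.items_insert_of_not_contains _ _ hrc,
            PySem.Dict.items_insert_of_not_contains _ _ hc']
        simp [redD, redEntry, reduceGroup]

theorem stepB_nodup (bm : PySem.Dict Int Int) (g : PySem.Dict Int (List (List (String × Int)))) (cut : List (String × Int))
    (hnd : g.keys.Nodup) : (mergeStepB bm g cut).keys.Nodup := by
  unfold mergeStepB
  cases hb : (PySem.Dict.mk cut).get? "band_index" with
  | none => exact hnd
  | some b =>
    cases hi : bm.get? b with
    | none => simpa [hi] using hnd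
    | some idx =>
      simp only [hi, PySem.Dict.modify]
      exact PySem.Dict.nodup_keys_insert _ _ _ hnd

theorem stepB_ne (bm : PySem.Dict Int Int) (g : PySem.Dict Int (List (List (String × Int)))) (cut : List (String × Int))
    (hne : ∀ p ∈ g.items, p.2 ≠ []) : ∀ p ∈ (mergeStepB bm g cut).items, p.2 ≠ [] := by
  unfold mergeStepB
  cases hb : (PySem.Dict.mk cut).get? "band_index" with
  | none => exact hne
  | some b =>
    cases hi : bm.get? b with
    | none => simpa [hi] using hne
    | some idx =>
      intro p hp
      simp only [hi, PySem.Dict.modify] at hp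
      rcases (PySem.Dict.mem_items_insert g _ _ _).mp hp with h | h
      · subst h; simp
      · exact hne _ h.1

theorem merge_loop (bm : PySem.Dict Int Int) : ∀ (cuts : List (List (String × Int))) (g : PySem.Dict Int (List (List (String × Int)))),
    g.keys.Nodup → (∀ p ∈ g.items, p.2 ≠ []) →
    List.foldl (mergeStepA bm) (redD g) cuts = redD (List.foldl (mergeStepB bm) g cuts) := by
  intro cuts
  induction cuts with
  | nil => intro g _ _; rfl
  | cons cut rest ih =>
    intro g hnd hne
    simp only [List.foldl_cons]
    rw [step_red bm g cut hnd hne]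
    exact ih _ (stepB_nodup bm g cut hnd) (stepB_ne bm g cut hne)

-- ===== VERDICT (by name: the statement is the Claim_ definition above) =====
theorem merge_cuts_to_reaeq_py_spec : Claim_equal_merge_cuts_to_reaeq_py := by
  intro cuts calibration _ _
  show merge_cuts_to_reaeq_py cuts calibration = merge_cuts_to_reaeq_py_alt cuts calibration
  unfold merge_cuts_to_reaeq_py merge_cuts_to_reaeq_py_alt
  have h0 : (PySem.Dict.mk ([] : List (Int × List (String × Int)))) = redD (PySem.Dict.mk []) := rfl
  rw [h0, merge_loop (band_to_reaeq_map_py calibration) cuts (PySem.Dict.mk []) (by simp [PySem.Dict.keys]) (by simp)]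
  rfl
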